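-- pv_equiv track=rewrite | github.com/jaxonjames123/SteganographyProject | steganography.py | replacePixels
-- ===== SOURCE A (Python) =====
-- def replacePixels(rgb_arr, split_p):
--     arr = []
--     color = 'r'
--
--     bin_c = 0
--     for i in range(0, len(rgb_arr)):
--         curr_pixel = list(rgb_arr[i])
--         bin_p = format(split_p[i], '08b')
--
--         if color == 'r':
--             bin_g = format(curr_pixel[1], '08b') #binary number for green
--             bin_b = format(curr_pixel[2], '08b') #binary number for blue
--             curr_pixel[1] = int(bin_g[:4] + bin_p[:4], 2)  #change last 4 bits in green
--             curr_pixel[2] = int(bin_b[:4] + bin_p[4:], 2)  #change last 4 bits in blue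
--             color = 'g'
--         elif color == 'g':
--             bin_r = format(curr_pixel[0], '08b') #binary number for red
--             bin_b = format(curr_pixel[2], '08b') #binary number for blue
--             curr_pixel[0] = int(bin_r[:4] + bin_p[:4], 2)  #change last 4 bits in red
--             curr_pixel[2] = int(bin_b[:4] + bin_p[4:], 2)  #change last 4 bits in blue
--             color = 'b'
--         elif color == 'b':
--             bin_r = format(curr_pixel[0], '08b') #binary number for blue
--             bin_g = format(curr_pixel[1], '08b') #binary number for green
--             curr_pixel[0] = int(bin_r[:4] + bin_p[:4], 2)  #change last 4 bits in red
--             curr_pixel[1] = int(bin_g[:4] + bin_p[4:], 2)  #change last 4 bits in green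
--             color = 'r'
--
--         arr.append(curr_pixel)
--
--     return arr;
-- ===== SOURCE B (Python) =====
-- def replacePixels(rgb_arr, split_p):
--     # Columnar (structure-of-arrays) version: split the image into its three
--     # channel columns, rewrite each column independently by its own rule, and
--     # zip the columns back into pixel rows.
--     n = len(rgb_arr)
--     vals = [format(split_p[i], '08b') for i in range(n)]
--     rs = [p[0] for p in rgb_arr]
--     gs = [p[1] for p in rgb_arr]
--     bs = [p[2] for p in rgb_arr]
--
--     def put(c, nib):
--         return int(format(c, '08b')[:4] + nib, 2)
--
--     # red is untouched on rows i % 3 == 0 and otherwise takes the high nibble;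
--     # green takes the high nibble on i % 3 == 0, is untouched on 1, low on 2;
--     # blue takes the low nibble except on rows i % 3 == 2.
--     new_r = [r if i % 3 == 0 else put(r, v[:4])
--              for i, (r, v) in enumerate(zip(rs, vals))]
--     new_g = [put(g, v[:4]) if i % 3 == 0 else g if i % 3 == 1 else put(g, v[4:])
--              for i, (g, v) in enumerate(zip(gs, vals))]
--     new_b = [put(b, v[4:]) if i % 3 != 2 else b
--              for i, (b, v) in enumerate(zip(bs, vals))]
--     return [[r, g, b] for r, g, b in zip(new_r, new_g, new_b)]
-- ===== Notes on version B (the rewrite author's own statement) =====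
-- stated objective: alternative
-- what changed: Replaces A's row-wise single pass with a threaded three-state 'color' variable by a columnar (structure-of-arrays) computation: the image is split into its red/green/blue channel columns, each column is rewritten independently by its own per-index rule (red: high nibble unless i%3==0; green: high/keep/low by i%3; blue: low nibble unless i%3==2), and the columns are zipped back into pixel rows; the nibble arithmetic (format(...,'08b') slicing + int(...,2)) is unchanged.
import Mathlib
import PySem

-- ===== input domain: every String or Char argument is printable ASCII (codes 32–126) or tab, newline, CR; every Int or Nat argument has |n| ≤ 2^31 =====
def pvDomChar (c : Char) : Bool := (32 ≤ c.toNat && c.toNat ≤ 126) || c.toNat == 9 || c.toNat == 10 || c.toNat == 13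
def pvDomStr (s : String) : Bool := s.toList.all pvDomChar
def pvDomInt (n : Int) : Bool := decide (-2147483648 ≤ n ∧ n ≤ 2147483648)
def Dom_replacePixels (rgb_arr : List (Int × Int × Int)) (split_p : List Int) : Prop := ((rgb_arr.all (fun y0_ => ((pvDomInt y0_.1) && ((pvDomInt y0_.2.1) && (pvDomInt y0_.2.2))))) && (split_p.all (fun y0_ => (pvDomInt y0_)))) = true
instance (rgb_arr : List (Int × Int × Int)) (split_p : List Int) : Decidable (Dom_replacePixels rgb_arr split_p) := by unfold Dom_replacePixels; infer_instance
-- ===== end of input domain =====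

-- B replaces A's row-wise state-machine pass by a columnar (structure-of-arrays)
-- computation: three independent channel columns, zipped back into rows; objective: alternative.

-- ===== PORT A =====
-- format(n, '08b'): toBinChars is format(n, 'b'); '08b' zero-pads to total width 8,
-- the sign (if any) counted in the width (exact for every Int).
def pyFmt08b (n : Int) : List Char :=
  match PySem.Int.toBinChars n with
  | '-' :: ds => '-' :: (List.replicate (7 - ds.length) '0' ++ ds)
  | ds => List.replicate (8 - ds.length) '0' ++ ds

-- int(s, 2): none is exactly Python's ValueError; under Pre_ every parse succeeds,
-- so .getD 0 is reached only outside Pre_.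
def pyInt2 (cs : List Char) : Int := (PySem.Int.ofCharsBase? cs 2).getD 0

-- the for-loop over range(len(rgb_arr)) with the threaded `color` state; the
-- `_ :: _, []` case is Python's IndexError on split_p[i] (excluded by Pre_).
def replacePixels_go : List (Int × Int × Int) → List Int → Char → List (List Int)
  | [], _, _ => []
  | _ :: _, [], _ => []
  | (r, g, b) :: ps, v :: sps, color =>
    let bin_p := pyFmt08b v
    if color = 'r' then
      [r, pyInt2 ((pyFmt08b g).take 4 ++ bin_p.take 4),
          pyInt2 ((pyFmt08b b).take 4 ++ bin_p.drop 4)] :: replacePixels_go ps sps 'g'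
    else if color = 'g' then
      [pyInt2 ((pyFmt08b r).take 4 ++ bin_p.take 4), g,
          pyInt2 ((pyFmt08b b).take 4 ++ bin_p.drop 4)] :: replacePixels_go ps sps 'b'
    else if color = 'b' then
      [pyInt2 ((pyFmt08b r).take 4 ++ bin_p.take 4),
          pyInt2 ((pyFmt08b g).take 4 ++ bin_p.drop 4), b] :: replacePixels_go ps sps 'r'
    else -- unreachable fall-through of the if/elif chain (pixel appended unchanged)
      [r, g, b] :: replacePixels_go ps sps color

def replacePixels (rgb_arr : List (Int × Int × Int)) (split_p : List Int) : List (List Int) :=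
  replacePixels_go rgb_arr split_p 'r'

-- ===== PORT B =====
-- put(c, nib) of Source B
def putNib (c : Int) (nib : List Char) : Int := pyInt2 ((pyFmt08b c).take 4 ++ nib)

-- Source B: columnar version.  split_p[i] in the `vals` comprehension raises
-- IndexError when out of range: pyGet? is none there; .getD 0 is reached only
-- outside Pre_.
def replacePixels_alt (rgb_arr : List (Int × Int × Int)) (split_p : List Int) : List (List Int) :=
  let n := rgb_arr.length
  let vals := (List.range n).map (fun (i : Nat) => pyFmt08b ((PySem.List.pyGet? split_p (i : Int)).getD 0))
  let rs := rgb_arr.map (fun p => p.1)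
  let gs := rgb_arr.map (fun p => p.2.1)
  let bs := rgb_arr.map (fun p => p.2.2)
  let newR := (PySem.List.enumerate (rs.zip vals)).map (fun iv =>
    if PySem.Int.mod iv.1 3 = 0 then iv.2.1 else putNib iv.2.1 (iv.2.2.take 4))
  let newG := (PySem.List.enumerate (gs.zip vals)).map (fun iv =>
    if PySem.Int.mod iv.1 3 = 0 then putNib iv.2.1 (iv.2.2.take 4)
    else if PySem.Int.mod iv.1 3 = 1 then iv.2.1 else putNib iv.2.1 (iv.2.2.drop 4))
  let newB := (PySem.List.enumerate (bs.zip vals)).map (fun iv =>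
    if PySem.Int.mod iv.1 3 ≠ 2 then putNib iv.2.1 (iv.2.2.drop 4) else iv.2.1)
  ((newR.zip newG).zip newB).map (fun t => [t.1.1, t.1.2, t.2])

-- ===== PRECONDITION & SPEC =====
-- Exactly where the Python A returns normally: split_p must cover every pixel index
-- (else IndexError) and the used split values must be ≥ 0 (a negative v makes
-- int(… + format(v,'08b')[:4], 2) hit the '-' sign mid-string: ValueError).
def Pre_replacePixels (rgb_arr : List (Int × Int × Int)) (split_p : List Int) : Prop :=
  rgb_arr.length ≤ split_p.length ∧ ∀ x ∈ split_p.take rgb_arr.length, 0 ≤ x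
instance (rgb_arr : List (Int × Int × Int)) (split_p : List Int) : Decidable (Pre_replacePixels rgb_arr split_p) := by unfold Pre_replacePixels; infer_instance

def pvWitness_replacePixels : (List (Int × Int × Int)) × List Int := ([(1, 2, 3), (4, 5, 6)], [100, 200])

def Spec_replacePixels (rgb_arr : List (Int × Int × Int)) (split_p : List Int) (out : List (List Int)) : Prop := out = replacePixels_alt rgb_arr split_p
instance (rgb_arr : List (Int × Int × Int)) (split_p : List Int) (out : List (List Int)) : Decidable (Spec_replacePixels rgb_arr split_p out) := by unfold Spec_replacePixels; infer_instance

-- ===== CLAIM (what is proved, stated in full; the proofs are below) =====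
def Claim_equal_replacePixels : Prop := ∀ (rgb_arr : List (Int × Int × Int)) (split_p : List Int), Dom_replacePixels rgb_arr split_p → Pre_replacePixels rgb_arr split_p → Spec_replacePixels rgb_arr split_p (replacePixels rgb_arr split_p)

-- ===== LEMMAS AND PROOFS =====
-- the common row value both programs compute at (0-based) row index i
def specRow (i : Int) (p : Int × Int × Int) (v : Int) : List Int :=
  let bits := pyFmt08b v
  if i % 3 = 0 then
    [p.1, pyInt2 ((pyFmt08b p.2.1).take 4 ++ bits.take 4),
          pyInt2 ((pyFmt08b p.2.2).take 4 ++ bits.drop 4)]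
  else if i % 3 = 1 then
    [pyInt2 ((pyFmt08b p.1).take 4 ++ bits.take 4), p.2.1,
     pyInt2 ((pyFmt08b p.2.2).take 4 ++ bits.drop 4)]
  else
    [pyInt2 ((pyFmt08b p.1).take 4 ++ bits.take 4),
     pyInt2 ((pyFmt08b p.2.1).take 4 ++ bits.drop 4), p.2.2]

def colorOf (k : Nat) : Char := if k % 3 = 0 then 'r' else if k % 3 = 1 then 'g' else 'b'

lemma go_eq (ps : List (Int × Int × Int)) : ∀ (sp : List Int) (k : Nat),
    replacePixels_go ps sp (colorOf k)
      = (PySem.List.enumerate (ps.zip sp) (k : Int)).map (fun x => specRow x.1 x.2.1 x.2.2) := by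
  induction ps with
  | nil => intro sp k; simp [replacePixels_go, PySem.List.enumerate_nil]
  | cons p ps ih =>
    intro sp k
    cases sp with
    | nil => simp [replacePixels_go]
    | cons v sps =>
      obtain ⟨r, g, b⟩ := p
      have h3 : k % 3 = 0 ∨ k % 3 = 1 ∨ k % 3 = 2 := by omega
      have hnext : ((k : Int) + 1) = ((k + 1 : Nat) : Int) := by push_cast; ring
      rcases h3 with h | h | h
      · have hc : colorOf k = 'r' := by simp [colorOf, h]
        have hc' : colorOf (k + 1) = 'g' := by
          have : (k + 1) % 3 = 1 := by omega
          simp [colorOf, this]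
        rw [hc]
        simp only [replacePixels_go, List.zip_cons_cons, PySem.List.enumerate_cons, List.map_cons,
          hnext, ← ih sps (k + 1), hc']
        have hm : ((k : Int) % 3) = 0 := by omega
        simp [specRow, hm]
      · have hc : colorOf k = 'g' := by simp [colorOf, h]
        have hc' : colorOf (k + 1) = 'b' := by
          have : (k + 1) % 3 = 2 := by omega
          simp [colorOf, this]
        rw [hc]
        simp only [replacePixels_go, List.zip_cons_cons, PySem.List.enumerate_cons, List.map_cons,
          hnext, ← ih sps (k + 1), hc']
        have hm : ((k : Int) % 3) = 1 := by omega
        simp [specRow, hm]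
      · have hc : colorOf k = 'b' := by simp [colorOf, h]
        have hc' : colorOf (k + 1) = 'r' := by
          have : (k + 1) % 3 = 0 := by omega
          simp [colorOf, this]
        rw [hc]
        simp only [replacePixels_go, List.zip_cons_cons, PySem.List.enumerate_cons, List.map_cons,
          hnext, ← ih sps (k + 1), hc']
        have hm : ((k : Int) % 3) = 2 := by omega
        simp [specRow, hm]

lemma enumerate_map {α β : Type} (f : α → β) (xs : List α) : ∀ (s : Int),
    PySem.List.enumerate (xs.map f) s = (PySem.List.enumerate xs s).map (fun p => (p.1, f p.2)) := by
  induction xs with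
  | nil => intro s; simp [PySem.List.enumerate_nil]
  | cons x xs ih => intro s; simp [PySem.List.enumerate_cons, ih]

lemma zip_take_self {α β : Type} (xs : List α) : ∀ (ys : List β), xs.zip (ys.take xs.length) = xs.zip ys := by
  induction xs with
  | nil => intro ys; simp
  | cons x xs ih => intro ys; cases ys <;> simp [ih]

lemma vals_eq (sp : List Int) (n : Nat) (h : n ≤ sp.length) :
    (List.range n).map (fun (i : Nat) => pyFmt08b ((PySem.List.pyGet? sp (i : Int)).getD 0))
      = (sp.take n).map pyFmt08b := by
  apply List.ext_getElem
  · simp [h]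
  · intro i h1 h2
    have hi : i < sp.length := by simp at h2; omega
    simp only [List.getElem_map, List.getElem_range, List.getElem_take]
    rw [PySem.List.pyGet?_natCast]
    simp [List.getElem?_eq_getElem hi]

lemma zipzip_self {γ : Type} (l : List γ) : (l.zip l).zip l = l.map (fun a => ((a, a), a)) := by
  induction l with
  | nil => simp
  | cons x xs ih => simp [ih]

lemma alt_eq (rgb_arr : List (Int × Int × Int)) (split_p : List Int)
    (hlen : rgb_arr.length ≤ split_p.length) :
    replacePixels_alt rgb_arr split_p
      = (PySem.List.enumerate (rgb_arr.zip split_p) (0 : Int)).map (fun x => specRow x.1 x.2.1 x.2.2) := by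
  have h3 : (0 : Int) < 3 := by norm_num
  simp only [replacePixels_alt, vals_eq split_p rgb_arr.length hlen, List.zip_map,
    enumerate_map, zip_take_self, List.map_map]
  simp only [zipzip_self, List.map_map]
  apply List.map_congr_left
  intro x _
  have hm : PySem.Int.mod x.1 3 = x.1 % 3 := PySem.Int.mod_eq_emod_of_pos (by norm_num)
  have h0 : 0 ≤ x.1 % 3 := Int.emod_nonneg x.1 (by norm_num)
  have hlt : x.1 % 3 < 3 := Int.emod_lt_of_pos x.1 h3
  simp only [Function.comp, specRow, putNib, Prod.map, hm]
  have : x.1 % 3 = 0 ∨ x.1 % 3 = 1 ∨ x.1 % 3 = 2 := by omega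
  rcases this with h | h | h <;> simp [h]

-- ===== VERDICT (by name: the statement is the Claim_ definition above) =====
theorem replacePixels_spec : Claim_equal_replacePixels := by
  intro rgb sp _ hpre
  unfold Spec_replacePixels replacePixels
  rw [alt_eq rgb sp hpre.1]
  have := go_eq rgb sp 0
  simpa [colorOf] using this
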